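-- pv_equiv track=rewrite | github.com/kuznetsovvj/education | algorithms/codeforces/1850f.py | check
-- ===== SOURCE A (Python) =====
-- from collections import defaultdict
--
-- def check(seq):
--     t = len(seq)
--     d, onecount = defaultdict(int), 0
--     for it in seq:
--         if it == 1:
--             onecount += 1
--         else:
--             k = it
--             while k <= t:
--                 d[k] += 1
--                 k += it
--     if len(d) == 0:
--         return onecount
--     return max(d.values()) + onecount
-- ===== SOURCE B (Python) =====
-- def check(seq):
--     t = len(seq)
--     freq = {}
--     for v in seq:
--         freq[v] = freq.get(v, 0) + 1
--     ones = freq.get(1, 0)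
--     best = 0
--     for k in range(1, t + 1):
--         s = 0
--         i = 1
--         while i * i <= k:
--             if k % i == 0:
--                 if i != 1:
--                     s += freq.get(i, 0)
--                 j = k // i
--                 if j != i and j != 1:
--                     s += freq.get(j, 0)
--             i += 1
--         if best < s:
--             best = s
--     return best + ones
-- ===== Notes on version B (the rewrite author's own statement) =====
-- stated objective: alternative
-- what changed: A walks the multiples of every occurrence into a tally dict and takes the dict max; B never sieves multiples or keeps a tally: for each candidate k = 1..t it counts the elements dividing k directly by enumerating k's divisor pairs (i, k//i) up to sqrt(k) against a frequency map, keeping a running maximum.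
import Mathlib
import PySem

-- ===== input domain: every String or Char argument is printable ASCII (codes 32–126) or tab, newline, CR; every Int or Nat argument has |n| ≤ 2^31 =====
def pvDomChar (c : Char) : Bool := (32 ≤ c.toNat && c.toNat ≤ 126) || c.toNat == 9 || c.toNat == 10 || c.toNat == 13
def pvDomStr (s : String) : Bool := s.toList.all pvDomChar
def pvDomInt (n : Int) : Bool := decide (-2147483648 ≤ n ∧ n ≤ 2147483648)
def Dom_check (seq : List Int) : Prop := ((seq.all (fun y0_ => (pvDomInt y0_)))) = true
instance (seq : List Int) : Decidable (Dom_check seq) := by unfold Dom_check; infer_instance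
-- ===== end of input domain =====

-- B replaces A's per-occurrence sieve over multiples (each element walks its own multiples into a
-- tally dict, then the dict max is taken) by a divisor scan: a frequency map is built once, and for
-- each candidate k = 1..t the elements dividing k are counted directly by enumerating k's divisor
-- pairs (i, k//i) up to sqrt(k), keeping a running maximum.  Equivalence is proved on Pre_
-- (all elements positive; elsewhere A's while-loop does not terminate).

-- ===== PORT A =====
-- the 'while k <= t: d[k] += 1; k += it' loop; fuel t.toNat+1 suffices whenever 1 ≤ it
-- (each step increases k by it ≥ 1); for it ≤ 0 the Python loop never terminates — excluded by Pre_.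
def whileA (t it : Int) : Nat → Int → PySem.Dict Int Int → PySem.Dict Int Int
  | 0, _, d => d
  | fuel + 1, k, d => if k ≤ t then whileA t it fuel (k + it) (d.modify k 0 (· + 1)) else d

def check (seq : List Int) : Int :=
  let t : Int := (seq.length : Int)
  let st := seq.foldl
    (fun (st : PySem.Dict Int Int × Int) it =>
      if it = 1 then (st.1, st.2 + 1)
      else (whileA t it (t.toNat + 1) it st.1, st.2))
    (PySem.Dict.empty, 0)
  if st.1.size = 0 then st.2
  else
    match PySem.List.max? st.1.values (fun x => x) with
    | some m => m + st.2
    | none => st.2   -- unreachable: size ≠ 0 means values ≠ []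

-- ===== PORT B =====
-- the 'while i * i <= k: …; i += 1' divisor-pair loop of Source B; fuel k.toNat+1 suffices
-- (i grows by 1 each step and the guard fails once i exceeds sqrt k ≤ k).
def whileB (k : Int) (freq : PySem.Dict Int Int) : Nat → Int → Int → Int
  | 0, _, s => s
  | fuel + 1, i, s =>
    if i * i ≤ k then
      whileB k freq fuel (i + 1)
        (if PySem.Int.mod k i = 0 then
          (let s1 := if i ≠ 1 then s + freq.getD i 0 else s
           let j := PySem.Int.floordiv k i
           if j ≠ i ∧ j ≠ 1 then s1 + freq.getD j 0 else s1)
         else s)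
    else s

def check_alt (seq : List Int) : Int :=
  let t : Int := (seq.length : Int)
  let freq := seq.foldl (fun (d : PySem.Dict Int Int) v => d.modify v 0 (· + 1)) PySem.Dict.empty
  let ones := freq.getD 1 0
  let best := (PySem.List.pyRange 1 (t + 1) 1).foldl
    (fun best k =>
      let s := whileB k freq (k.toNat + 1) 1 0
      if best < s then s else best) 0
  best + ones

-- ===== PRECONDITION & SPEC =====
-- Pre_ excludes lists containing an element ≤ 0: there A never returns (its inner while-loop
-- runs forever, since k += it with it ≤ 0 never exceeds t); A returns on exactly the inputs Pre_ admits.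
def Pre_check (seq : List Int) : Prop := ∀ x ∈ seq, 1 ≤ x
instance (seq : List Int) : Decidable (Pre_check seq) := by unfold Pre_check; infer_instance
def pvWitness_check : List Int := [2, 1, 2, 4]

def Spec_check (seq : List Int) (out : Int) : Prop := out = check_alt seq
instance (seq : List Int) (out : Int) : Decidable (Spec_check seq out) := by unfold Spec_check; infer_instance

-- ===== CLAIM (what is proved, stated in full; the proofs are below) =====
def Claim_equal_check : Prop := ∀ (seq : List Int), Dom_check seq → Pre_check seq → Spec_check seq (check seq)

-- ===== LEMMAS AND PROOFS =====

-- the multiples list range(it, t+1, it) of every non-1 element, concatenated: A's dict is its counter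
def mulList (t : Int) (seq : List Int) : List Int :=
  seq.flatMap (fun it => if it = 1 then [] else PySem.List.pyRange it (t + 1) it)

-- the common count: how many non-1 elements of seq have k on their multiples list
def cKey (t : Int) (seq : List Int) (k : Int) : Nat :=
  seq.countP (fun it => decide (it ≠ 1) && decide (k ∈ PySem.List.pyRange it (t + 1) it))

lemma pyRange_pos_nil {a b s : Int} (hs : 0 < s) (hab : b ≤ a) :
    PySem.List.pyRange a b s = [] := by
  rw [PySem.List.pyRange_of_pos a b hs]
  rw [if_neg (by omega)]
  simp

lemma pyRange_pos_cons {a b s : Int} (hs : 0 < s) (hab : a < b) :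
    PySem.List.pyRange a b s = a :: PySem.List.pyRange (a + s) b s := by
  rw [PySem.List.pyRange_of_pos a b hs, PySem.List.pyRange_of_pos (a+s) b hs]
  rw [if_pos hab]
  have key : ((b - a + s - 1) / s).toNat = (if a + s < b then ((b - (a+s) + s - 1) / s).toNat else 0) + 1 := by
    split_ifs with h
    · have e1 : (b - a + s - 1) / s = (b - a - 1) / s + 1 := by
        have : b - a + s - 1 = (b - a - 1) + 1 * s := by ring
        rw [this, Int.add_mul_ediv_right _ _ (by omega)]
      have e2 : b - (a+s) + s - 1 = b - a - 1 := by ring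
      have hq : 0 ≤ (b - a - 1) / s := Int.ediv_nonneg (by omega) (by omega)
      rw [e1, e2]; omega
    · have e1 : (b - a + s - 1) / s = 1 := by
        have hx : b - a + s - 1 = (b - a - 1) + 1 * s := by ring
        rw [hx, Int.add_mul_ediv_right _ _ (by omega)]
        rw [Int.ediv_eq_zero_of_lt (by omega) (by omega)]
        norm_num
      rw [e1]; rfl
  rw [key, List.range_succ_eq_map]
  simp only [List.map_cons, List.map_map, Nat.cast_zero, mul_zero, add_zero]
  congr 1
  apply List.map_congr_left
  intro x _
  simp only [Function.comp_apply, Nat.succ_eq_add_one]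
  push_cast
  ring

lemma nodup_pyRange_pos {a b s : Int} (hs : 0 < s) : (PySem.List.pyRange a b s).Nodup := by
  rw [PySem.List.pyRange_of_pos a b hs]
  apply List.Nodup.map
  · intro x y hxy
    have : s * (x:Int) = s * y := by linarith
    have := mul_left_cancel₀ (by omega : (s:Int) ≠ 0) this
    exact_mod_cast this
  · exact List.nodup_range

lemma whileA_eq (t it : Int) (hit : 0 < it) :
    ∀ (fuel : Nat) (k : Int) (d : PySem.Dict Int Int), t - k < (fuel : Int) * it →
      whileA t it fuel k d =
        (PySem.List.pyRange k (t + 1) it).foldl (fun d x => d.modify x 0 (· + 1)) d := by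
  intro fuel
  induction fuel with
  | zero =>
    intro k d h
    rw [pyRange_pos_nil hit (by push_cast at h; omega)]
    rfl
  | succ n ih =>
    intro k d h
    by_cases hk : k ≤ t
    · rw [whileA, if_pos hk, pyRange_pos_cons hit (by omega), List.foldl_cons]
      apply ih
      push_cast at h ⊢
      linarith
    · rw [whileA, if_neg hk, pyRange_pos_nil hit (by omega)]
      rfl

lemma foldA_eq (t : Int) :
    ∀ (seq : List Int) (d0 : PySem.Dict Int Int) (n0 : Int), (∀ x ∈ seq, 1 ≤ x) → 0 ≤ t →
      seq.foldl
        (fun (st : PySem.Dict Int Int × Int) it =>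
          if it = 1 then (st.1, st.2 + 1)
          else (whileA t it (t.toNat + 1) it st.1, st.2)) (d0, n0) =
      ((mulList t seq).foldl (fun d x => d.modify x 0 (· + 1)) d0, n0 + (seq.count 1 : Int)) := by
  intro seq
  induction seq with
  | nil => intro d0 n0 _ _; simp [mulList]
  | cons it rest ih =>
    intro d0 n0 hpos ht
    have hit1 : 1 ≤ it := hpos it (by simp)
    rw [List.foldl_cons]
    by_cases h1 : it = 1
    · rw [if_pos h1]
      rw [ih d0 (n0 + 1) (fun x hx => hpos x (by simp [hx])) ht]
      subst h1
      simp [mulList]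
      ring
    · rw [if_neg h1]
      rw [ih _ n0 (fun x hx => hpos x (by simp [hx])) ht]
      rw [whileA_eq t it (by omega) _ it d0 (by push_cast; nlinarith [Int.toNat_of_nonneg ht])]
      simp [mulList, h1]

lemma count_mulList (t : Int) (seq : List Int) (hpos : ∀ x ∈ seq, 1 ≤ x) (k : Int) :
    (mulList t seq).count k = cKey t seq k := by
  unfold mulList cKey
  rw [List.count_flatMap]
  rw [← PySem.List.sum_map_ite_one_zero_nat]
  congr 1
  apply List.map_congr_left
  intro it hit
  have h1 : 1 ≤ it := hpos it hit
  simp only [Function.comp_apply]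
  by_cases he : it = 1
  · simp [he]
  · rw [if_neg he]
    by_cases hm : k ∈ PySem.List.pyRange it (t + 1) it
    · rw [List.count_eq_one_of_mem (nodup_pyRange_pos (by omega)) hm]
      simp [he, hm]
    · rw [List.count_eq_zero_of_not_mem hm]
      simp [he, hm]

lemma mem_mulList_iff (t : Int) (seq : List Int) (k : Int) :
    k ∈ mulList t seq ↔ 0 < cKey t seq k := by
  unfold mulList cKey
  rw [List.countP_pos_iff, List.mem_flatMap]
  constructor
  · rintro ⟨it, hit, hm⟩
    by_cases he : it = 1
    · simp [he] at hm
    · refine ⟨it, hit, ?_⟩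
      rw [if_neg he] at hm
      simp [he, hm]
  · rintro ⟨it, hit, hm⟩
    simp only [Bool.and_eq_true, decide_eq_true_eq] at hm
    exact ⟨it, hit, by rw [if_neg hm.1]; exact hm.2⟩

-- exact-division facts used throughout the divisor-scan analysis
lemma div_facts {k v : Int} (hk : 1 ≤ k) (hv : 1 ≤ v) (hdvd : v ∣ k) :
    1 ≤ k / v ∧ v * (k / v) = k ∧ k / (k / v) = v := by
  obtain ⟨w, rfl⟩ := hdvd
  have hdiv : v * w / v = w := Int.mul_ediv_cancel_left w (by omega)
  have hw : 1 ≤ w := by nlinarith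
  have hdiv2 : v * w / w = v := by rw [mul_comm]; exact Int.mul_ediv_cancel_left v (by omega)
  refine ⟨by rw [hdiv]; exact hw, by rw [hdiv], by rw [hdiv, hdiv2]⟩

-- a count splits along a pointwise disjoint disjunction of predicates
lemma countP_split (p q r : Int → Bool) :
    ∀ (xs : List Int), (∀ v ∈ xs, (p v = true ↔ (q v = true ∨ r v = true))) →
      (∀ v ∈ xs, ¬(q v = true ∧ r v = true)) →
      xs.countP p = xs.countP q + xs.countP r := by
  intro xs
  induction xs with
  | nil => intro _ _; simp
  | cons a l ih =>
    intro h hd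
    have ha := h a (by simp)
    have hda := hd a (by simp)
    have ihl := ih (fun v hv => h v (by simp [hv])) (fun v hv => hd v (by simp [hv]))
    simp only [List.countP_cons]
    cases hq : q a <;> cases hr : r a <;> cases hp : p a <;> simp_all <;> omega

-- counting the elements equal to a fixed value under a side condition
lemma countP_single (xs : List Int) (a : Int) (C : Prop) [Decidable C] :
    xs.countP (fun v => decide (v = a ∧ C)) = if C then xs.count a else 0 := by
  by_cases hC : C
  · rw [if_pos hC, List.count]
    apply List.countP_congr
    intro v _
    simp [hC]
  · rw [if_neg hC]
    rw [List.countP_eq_zero]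
    intro v _
    simp [hC]

-- no element both ≥ i and with cofactor ≥ i can divide k once k < i*i
lemma countP_big (k i : Int) (seq : List Int) (hk : 1 ≤ k) (hi : 1 ≤ i) (hbig : k < i * i)
    (hpos : ∀ v ∈ seq, 1 ≤ v) :
    seq.countP (fun v => decide (v ≠ 1 ∧ v ∣ k ∧ i ≤ v ∧ i ≤ k / v)) = 0 := by
  rw [List.countP_eq_zero]
  intro v hv hP
  rw [decide_eq_true_eq] at hP
  obtain ⟨h1, hdv, hiv, hikv⟩ := hP
  obtain ⟨g1, g2, g3⟩ := div_facts hk (hpos v hv) hdv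
  have hmul : i * i ≤ v * (k / v) :=
    mul_le_mul hiv hikv (by omega) (by omega)
  omega

-- one step of the divisor-pair scan: the divisors with min(d, k/d) = i split off as {i, k/i}
lemma step_iff (k i v : Int) (hk : 1 ≤ k) (hi : 1 ≤ i) (hii : i * i ≤ k) (hdvd : i ∣ k)
    (hv : 1 ≤ v) :
    (v ≠ 1 ∧ v ∣ k ∧ i ≤ v ∧ i ≤ k / v)
      ↔ ((v ≠ 1 ∧ v ∣ k ∧ i + 1 ≤ v ∧ i + 1 ≤ k / v)
         ∨ ((v = i ∧ i ≠ 1) ∨ (v = k / i ∧ (k / i ≠ i ∧ k / i ≠ 1)))) := by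
  obtain ⟨hm1, hm2, hm3⟩ := div_facts hk hi hdvd
  have hile : i ≤ k / i := by nlinarith
  constructor
  · rintro ⟨h1, hdv, hiv, hikv⟩
    obtain ⟨g1, g2, g3⟩ := div_facts hk hv hdv
    by_cases hvi : v = i
    · exact Or.inr (Or.inl ⟨hvi, by rw [← hvi]; exact h1⟩)
    · by_cases hkvi : k / v = i
      · have hveq : v = k / i := by rw [← hkvi, g3]
        exact Or.inr (Or.inr ⟨hveq, by rw [← hveq]; exact hvi, by rw [← hveq]; exact h1⟩)
      · exact Or.inl ⟨h1, hdv, by omega, by omega⟩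
  · rintro (⟨h1, hdv, hiv, hikv⟩ | ⟨rfl, h1⟩ | ⟨rfl, hne, h1⟩)
    · exact ⟨h1, hdv, by omega, by omega⟩
    · exact ⟨h1, hdvd, le_refl _, hile⟩
    · refine ⟨h1, ⟨i, ?_⟩, hile, by rw [hm3]⟩
      rw [mul_comm i (k / i)] at hm2
      exact hm2.symm

-- the divisor-pair while-loop counts, from step i on, the elements v ∣ k with min(v, k/v) ≥ i
lemma whileB_inv (seq : List Int) (k : Int) (hk : 1 ≤ k) (hpos : ∀ v ∈ seq, 1 ≤ v) :
    ∀ (fuel : Nat) (i s : Int), 1 ≤ i → k < (i + (fuel : Int)) * (i + (fuel : Int)) →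
      whileB k (PySem.Dict.counter seq) fuel i s
        = s + (seq.countP (fun v => decide (v ≠ 1 ∧ v ∣ k ∧ i ≤ v ∧ i ≤ k / v)) : Int) := by
  intro fuel
  induction fuel with
  | zero =>
    intro i s hi hlt
    rw [countP_big k i seq hk hi (by push_cast at hlt; simpa using hlt) hpos]
    simp [whileB]
  | succ n ih =>
    intro i s hi hlt
    by_cases hii : i * i ≤ k
    · have hdvd_cases : PySem.Int.mod k i = 0 ↔ i ∣ k := PySem.Int.mod_eq_zero_iff_dvd k i
      rw [whileB, if_pos hii]
      rw [ih (i + 1) _ (by omega) (by push_cast at hlt ⊢; nlinarith)]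
      by_cases hdvd : i ∣ k
      · rw [if_pos (hdvd_cases.mpr hdvd)]
        have hfd : PySem.Int.floordiv k i = k / i :=
          PySem.Int.floordiv_eq_ediv_of_pos (by omega)
        have hsplit : seq.countP (fun v => decide (v ≠ 1 ∧ v ∣ k ∧ i ≤ v ∧ i ≤ k / v))
            = seq.countP (fun v => decide (v ≠ 1 ∧ v ∣ k ∧ i + 1 ≤ v ∧ i + 1 ≤ k / v))
              + seq.countP (fun v => decide ((v = i ∧ i ≠ 1) ∨ (v = k / i ∧ (k / i ≠ i ∧ k / i ≠ 1)))) := by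
          apply countP_split
          · intro v hv
            simp only [decide_eq_true_eq]
            exact step_iff k i v hk hi hii hdvd (hpos v hv)
          · intro v hv
            simp only [decide_eq_true_eq]
            rintro ⟨⟨_, _, hge, hge2⟩, (⟨rfl, _⟩ | ⟨rfl, hq⟩)⟩
            · omega
            · obtain ⟨hm1, hm2, hm3⟩ := div_facts hk hi hdvd
              rw [hm3] at hge2
              omega
        have hsplit2 : seq.countP (fun v => decide ((v = i ∧ i ≠ 1) ∨ (v = k / i ∧ (k / i ≠ i ∧ k / i ≠ 1))))
            = seq.countP (fun v => decide (v = i ∧ i ≠ 1))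
              + seq.countP (fun v => decide (v = k / i ∧ (k / i ≠ i ∧ k / i ≠ 1))) := by
          apply countP_split
          · intro v _
            simp only [decide_eq_true_eq]
          · intro v _
            simp only [decide_eq_true_eq]
            rintro ⟨⟨rfl, _⟩, ⟨heq, hne, _⟩⟩
            exact hne heq.symm
        rw [hsplit, hsplit2, countP_single, countP_single, hfd]
        simp only [PySem.Dict.getD_counter]
        split_ifs <;> push_cast <;> omega
      · rw [if_neg (fun h => hdvd (hdvd_cases.mp h))]
        congr 2
        apply List.countP_congr
        intro v hv
        simp only [decide_eq_true_eq]
        constructor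
        · rintro ⟨h1, hdv, hiv, hikv⟩
          exact ⟨h1, hdv, by omega, by omega⟩
        · rintro ⟨h1, hdv, hiv, hikv⟩
          obtain ⟨g1, g2, g3⟩ := div_facts hk (hpos v hv) hdv
          have hvne : v ≠ i := fun h => hdvd (h ▸ hdv)
          have hkvne : k / v ≠ i := by
            intro h
            apply hdvd
            refine ⟨v, ?_⟩
            rw [← h]
            rw [mul_comm v (k / v)] at g2
            exact g2.symm
          exact ⟨h1, hdv, by omega, by omega⟩
    · rw [whileB, if_neg hii, countP_big k i seq hk hi (by omega) hpos]
      simp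

-- the full scan at k (started at i = 1 with fuel k+1) computes the shared count cKey
lemma sB_eq (seq : List Int) (hpos : ∀ v ∈ seq, 1 ≤ v) (k : Int) (hk1 : 1 ≤ k)
    (hkt : k ≤ (seq.length : Int)) :
    whileB k (PySem.Dict.counter seq) (k.toNat + 1) 1 0
      = (cKey (seq.length : Int) seq k : Int) := by
  have hkn : ((k.toNat : Nat) : Int) = k := Int.toNat_of_nonneg (by omega)
  rw [whileB_inv seq k hk1 hpos (k.toNat + 1) 1 0 (by omega) (by push_cast; nlinarith)]
  rw [zero_add]
  unfold cKey
  congr 1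
  apply List.countP_congr
  intro v hv
  have hv1 := hpos v hv
  simp only [decide_eq_true_eq, Bool.and_eq_true]
  constructor
  · rintro ⟨h1, hdv, _, h4⟩
    obtain ⟨g1, g2, g3⟩ := div_facts hk1 hv1 hdv
    refine ⟨h1, ?_⟩
    rw [PySem.List.mem_pyRange_iff_of_pos (by omega : (0:Int) < v)]
    exact ⟨by nlinarith, by omega, dvd_sub hdv dvd_rfl⟩
  · rintro ⟨h1, hm⟩
    rw [PySem.List.mem_pyRange_iff_of_pos (by omega : (0:Int) < v)] at hm
    obtain ⟨hle, hlt, hdv'⟩ := hm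
    have hdv : v ∣ k := by
      have := dvd_add hdv' (dvd_refl v)
      simpa using this
    refine ⟨h1, hdv, by omega, ?_⟩
    rw [Int.le_ediv_iff_mul_le (by omega : (0:Int) < v)]
    omega

-- the running-maximum fold dominates its start and every scanned value
lemma foldl_best_ge (f : Int → Int) :
    ∀ (ks : List Int) (b : Int),
      b ≤ ks.foldl (fun b k => if b < f k then f k else b) b ∧
      ∀ k ∈ ks, f k ≤ ks.foldl (fun b k => if b < f k then f k else b) b := by
  intro ks
  induction ks with
  | nil => intro b; simp
  | cons a l ih =>
    intro b
    rw [List.foldl_cons]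
    obtain ⟨ih1, ih2⟩ := ih (if b < f a then f a else b)
    have hbb' : b ≤ (if b < f a then f a else b) ∧ f a ≤ (if b < f a then f a else b) := by
      split_ifs <;> omega
    refine ⟨le_trans hbb'.1 ih1, ?_⟩
    intro k hk
    rcases List.mem_cons.mp hk with rfl | hk
    · exact le_trans hbb'.2 ih1
    · exact ih2 k hk

-- the running-maximum fold returns its start or one of the scanned values
lemma foldl_best_cases (f : Int → Int) :
    ∀ (ks : List Int) (b : Int),
      ks.foldl (fun b k => if b < f k then f k else b) b = b ∨
      ∃ k ∈ ks, ks.foldl (fun b k => if b < f k then f k else b) b = f k := by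
  intro ks
  induction ks with
  | nil => intro b; simp
  | cons a l ih =>
    intro b
    rw [List.foldl_cons]
    rcases ih (if b < f a then f a else b) with h | ⟨k, hk, h⟩
    · rw [h]
      split_ifs with hba
      · exact Or.inr ⟨a, by simp, rfl⟩
      · exact Or.inl rfl
    · exact Or.inr ⟨k, by simp [hk], h⟩

-- ===== VERDICT (by name: the statement is the Claim_ definition above) =====
theorem check_spec : Claim_equal_check := by
  intro seq _ hpre
  unfold Spec_check
  unfold Pre_check at hpre
  have ht : (0:Int) ≤ (seq.length : Int) := Int.natCast_nonneg _
  set t : Int := (seq.length : Int) with hts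
  set L : List Int := mulList t seq with hL
  set ones : Int := (seq.count 1 : Int) with hones
  -- A side
  have hA : check seq =
      (if (PySem.Dict.counter L).size = 0 then 0 + ones
       else match PySem.List.max? (PySem.Dict.counter L).values (fun x => x) with
            | some m => m + (0 + ones)
            | none => 0 + ones) := by
    simp only [check]
    rw [foldA_eq t seq PySem.Dict.empty 0 hpre ht, ← PySem.Dict.counter_eq_foldl]
  -- B side
  set F : Int → Int := fun k => whileB k (PySem.Dict.counter seq) (k.toNat + 1) 1 0 with hF
  set KS : List Int := PySem.List.pyRange 1 (t + 1) 1 with hKS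
  have hB : check_alt seq =
      KS.foldl (fun b k => if b < F k then F k else b) 0 + (PySem.Dict.counter seq).getD 1 0 := by
    simp only [check_alt, ← PySem.Dict.counter_eq_foldl, ← hts, ← hKS]
    rfl
  rw [hB, PySem.Dict.getD_counter, ← hones]
  -- every scanned value is the shared count cKey
  have hFk : ∀ k ∈ KS, F k = (cKey t seq k : Int) := by
    intro k hk
    rw [hKS, PySem.List.mem_pyRange_one] at hk
    exact sB_eq seq hpre k hk.1 (by omega)
  obtain ⟨hge0, hgeall⟩ := foldl_best_ge F KS 0
  rcases foldl_best_cases F KS 0 with hcase | ⟨k0, hk0, hcase⟩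
  all_goals rw [hA]
  · -- the fold returned its start 0: no k in 1..t has a positive count, so A's dict is empty too
    by_cases hsz : (PySem.Dict.counter L).size = 0
    · rw [if_pos hsz, hcase]
    · exfalso
      -- a nonempty dict has a key v0 ∈ L, i.e. some k with cKey > 0, contradicting fold = 0
      have hLne : L ≠ [] := by
        intro hnil
        apply hsz
        rw [hnil]
        rfl
      obtain ⟨x0, hx0⟩ := List.exists_mem_of_ne_nil L hLne
      have hck : 0 < cKey t seq x0 := (mem_mulList_iff t seq x0).mp hx0
      have hx0b : 1 ≤ x0 ∧ x0 ≤ t := by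
        rw [hL] at hx0
        unfold mulList at hx0
        obtain ⟨it, hit, hr⟩ := List.mem_flatMap.mp hx0
        by_cases h1 : it = 1
        · rw [if_pos h1] at hr; simp at hr
        · rw [if_neg h1] at hr
          have hp := hpre it hit
          have := (PySem.List.mem_pyRange_iff_of_pos (by omega : (0:Int) < it) x0).mp hr
          omega
      have hx0KS : x0 ∈ KS := by
        rw [hKS, PySem.List.mem_pyRange_one]
        omega
      have := hgeall x0 hx0KS
      rw [hFk x0 hx0KS, hcase] at this
      omega
  · -- the fold returned F k0 = cKey k0
    rw [hcase, hFk k0 hk0]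
    by_cases hsz : (PySem.Dict.counter L).size = 0
    · -- empty dict: every cKey is 0
      rw [if_pos hsz]
      have hLnil : L = [] := by
        by_contra hne
        obtain ⟨x0, hx0⟩ := List.exists_mem_of_ne_nil L hne
        have hit : (PySem.Dict.counter L).items = [] := List.length_eq_zero_iff.mp hsz
        have hmap := PySem.Dict.items_counter L
        rw [hit] at hmap
        have hS : PySem.Set.ofList L = [] := List.map_eq_nil_iff.mp hmap.symm
        have hmem : x0 ∈ PySem.Set.ofList L := (PySem.Set.mem_ofList L x0).mpr hx0
        rw [hS] at hmem
        simp at hmem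
      have : cKey t seq k0 = 0 := by
        by_contra hne
        have : k0 ∈ L := (mem_mulList_iff t seq k0).mpr (by omega)
        rw [hLnil] at this
        simp at this
      rw [this]
      simp
    · -- nonempty dict: A returns max of the counts, B's fold equals it
      rw [if_neg hsz]
      have hvals : (PySem.Dict.counter L).values
          = (PySem.Set.ofList L).map (fun v => ((L.count v : Nat) : Int)) := by
        show ((PySem.Dict.counter L).items).map (·.2) = _
        rw [PySem.Dict.items_counter, List.map_map]
        rfl
      have hLne : L ≠ [] := by
        intro hnil
        apply hsz
        rw [hnil]
        rfl
      obtain ⟨x0, hx0⟩ := List.exists_mem_of_ne_nil L hLne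
      have hvne : (PySem.Dict.counter L).values ≠ [] := by
        rw [hvals]
        have : x0 ∈ PySem.Set.ofList L := (PySem.Set.mem_ofList L x0).mpr hx0
        intro hcon
        rw [List.map_eq_nil_iff] at hcon
        rw [hcon] at this
        simp at this
      cases hmx : PySem.List.max? (PySem.Dict.counter L).values (fun x => x) with
      | none => exact absurd ((PySem.List.max?_eq_none_iff _ _).mp hmx) hvne
      | some m =>
        -- m = count of some v0 ∈ L; 1 ≤ v0 ≤ t
        have hmmem := PySem.List.max?_mem hmx
        rw [hvals] at hmmem
        obtain ⟨v0, hv0S, hv0m⟩ := List.mem_map.mp hmmem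
        have hv0L : v0 ∈ L := (PySem.Set.mem_ofList L v0).mp hv0S
        have hcountpos : 0 < L.count v0 := List.count_pos_iff.mpr hv0L
        have hv0bounds : 1 ≤ v0 ∧ v0 ≤ t := by
          rw [hL] at hv0L
          unfold mulList at hv0L
          obtain ⟨it, hit, hv0r⟩ := List.mem_flatMap.mp hv0L
          by_cases h1 : it = 1
          · rw [if_pos h1] at hv0r; simp at hv0r
          · rw [if_neg h1] at hv0r
            have hp := hpre it hit
            have := (PySem.List.mem_pyRange_iff_of_pos (by omega : (0:Int) < it) v0).mp hv0r
            omega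
        have hck : (L.count v0 : Int) = (cKey t seq v0 : Int) := by
          rw [count_mulList t seq hpre v0]
        have hv0KS : v0 ∈ KS := by
          rw [hKS, PySem.List.mem_pyRange_one]
          omega
        -- B's fold ≥ m …
        have hgem : m ≤ (cKey t seq k0 : Int) := by
          have h := hgeall v0 hv0KS
          rw [hFk v0 hv0KS, ← hck, hv0m, hcase, hFk k0 hk0] at h
          exact h
        -- … and ≤ m
        have hlem : (cKey t seq k0 : Int) ≤ m := by
          by_cases hz : cKey t seq k0 = 0
          · rw [hz, ← hv0m]
            push_cast
            omega
          · have hkL : k0 ∈ L := (mem_mulList_iff t seq k0).mpr (by omega)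
            have hkS : k0 ∈ PySem.Set.ofList L := (PySem.Set.mem_ofList L _).mpr hkL
            have hmemv : ((L.count k0 : Nat) : Int) ∈ (PySem.Dict.counter L).values := by
              rw [hvals]
              exact List.mem_map.mpr ⟨k0, hkS, rfl⟩
            have := PySem.List.max?_isMax hmx _ hmemv
            rw [count_mulList t seq hpre k0] at this
            exact this
        simp only []
        omega
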